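-- pv_equiv track=rewrite | github.com/TenkoShim/Homework_For_phyton-Minitask | Minitask1.py | neg_number
-- ===== SOURCE A (Python) =====
-- def neg_number(n, count) -> int:
--     n = abs(n)
--     flag = True  # You need to find first 1
--     while n:
--         if n % 2:
--             flag = False  # to check if its 1 and skip counting
--         elif not flag:
--             count += 1
--         n >>= 1
--     return count + 1
-- ===== SOURCE B (Python) =====
-- def neg_number(n, count) -> int:
--     t = abs(n)
--     if t == 0:
--         return count + 1
--     s = bin(t)[2:].rstrip('0')
--     return count + s.count('0') + 1
-- ===== Notes on version B (the rewrite author's own statement) =====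
-- stated objective: simpler
-- what changed: Replaces A's flag-carrying bit loop by one expression: render abs(n) in binary, strip trailing zeros, and count the remaining '0' characters.
import Mathlib
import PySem

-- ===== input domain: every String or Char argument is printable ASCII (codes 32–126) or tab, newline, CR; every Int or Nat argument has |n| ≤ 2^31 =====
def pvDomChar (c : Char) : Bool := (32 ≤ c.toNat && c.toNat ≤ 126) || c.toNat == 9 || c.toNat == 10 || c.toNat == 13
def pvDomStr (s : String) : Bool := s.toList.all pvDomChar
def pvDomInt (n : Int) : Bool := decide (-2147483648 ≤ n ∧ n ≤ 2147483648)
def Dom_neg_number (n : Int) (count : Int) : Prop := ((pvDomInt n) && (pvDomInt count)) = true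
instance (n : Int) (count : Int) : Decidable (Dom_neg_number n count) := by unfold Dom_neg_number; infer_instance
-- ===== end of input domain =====

-- B replaces A's flag-carrying bit loop by a string-based formulation (strip trailing zeros of the binary rendering, count the remaining zeros); objective: simpler, no speed claim.

-- ===== PORT A =====
-- while loop of A: state (n, flag, count), halving n each step
def negLoop (m : Nat) (flag : Bool) (count : Int) : Int :=
  if m = 0 then count
  else if m % 2 = 1 then negLoop (m / 2) false count
  else if !flag then negLoop (m / 2) flag (count + 1)
  else negLoop (m / 2) flag count
termination_by m
decreasing_by all_goals exact Nat.div_lt_self (by omega) (by omega)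

def neg_number (n : Int) (count : Int) : Int :=
  negLoop n.natAbs true count + 1

-- ===== PORT B =====
-- bin(t)[2:] as a list of '0'/'1' characters, most significant first
def binDigits (t : Nat) : List Char :=
  if t = 0 then []
  else binDigits (t / 2) ++ [if t % 2 = 1 then '1' else '0']
termination_by t
decreasing_by exact Nat.div_lt_self (by omega) (by omega)

-- s.rstrip('0')
def rstrip0 (s : List Char) : List Char :=
  ((s.reverse).dropWhile (· == '0')).reverse

def neg_number_alt (n : Int) (count : Int) : Int :=
  let t := n.natAbs
  if t = 0 then count + 1
  else count + ((rstrip0 (binDigits t)).count '0') + 1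

-- ===== PRECONDITION & SPEC =====
def Spec_neg_number (n : Int) (count : Int) (out : Int) : Prop := out = neg_number_alt n count
instance (n : Int) (count : Int) (out : Int) : Decidable (Spec_neg_number n count out) := by unfold Spec_neg_number; infer_instance

-- ===== CLAIM (what is proved, stated in full; the proofs are below) =====
def Claim_equal_neg_number : Prop := ∀ (n : Int) (count : Int), Dom_neg_number n count → Spec_neg_number n count (neg_number n count)

-- ===== LEMMAS AND PROOFS =====

-- ===== VERDICT (by name: the statement is the Claim_ definition above) =====
-- lsb-first bit characters of t
def rbits (t : Nat) : List Char :=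
  if t = 0 then []
  else (if t % 2 = 1 then '1' else '0') :: rbits (t / 2)
termination_by t
decreasing_by exact Nat.div_lt_self (by omega) (by omega)

lemma binDigits_reverse (t : Nat) : (binDigits t).reverse = rbits t := by
  induction t using Nat.strong_induction_on with
  | _ t ih =>
    rw [binDigits, rbits]
    by_cases h : t = 0
    · simp [h]
    · simp only [h, List.reverse_append, List.reverse_cons, List.reverse_nil,
        List.nil_append, List.cons_append, ite_false]
      rw [ih (t / 2) (Nat.div_lt_self (by omega) (by omega))]

lemma negLoop_false (t : Nat) (count : Int) :
    negLoop t false count = count + (rbits t).count '0' := by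
  induction t using Nat.strong_induction_on generalizing count with
  | _ t ih =>
    rw [negLoop, rbits]
    by_cases h : t = 0
    · simp [h]
    · have hlt := Nat.div_lt_self (Nat.pos_of_ne_zero h) one_lt_two
      by_cases hp : t % 2 = 1
      · simp only [h, hp, ite_true, ite_false]
        rw [ih (t / 2) hlt]
        simp
      · simp only [h, hp, ite_false, Bool.not_false, ite_true]
        rw [ih (t / 2) hlt]
        simp
        omega

lemma negLoop_true (t : Nat) (count : Int) :
    negLoop t true count = count + ((rbits t).dropWhile (· == '0')).count '0' := by
  induction t using Nat.strong_induction_on generalizing count with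
  | _ t ih =>
    rw [negLoop, rbits]
    by_cases h : t = 0
    · simp [h]
    · have hlt := Nat.div_lt_self (Nat.pos_of_ne_zero h) one_lt_two
      by_cases hp : t % 2 = 1
      · simp only [h, hp, ite_true, ite_false]
        rw [negLoop_false (t / 2)]
        simp [List.dropWhile]
      · simp only [h, hp, ite_false, Bool.not_true]
        simp only [List.dropWhile]
        exact ih (t / 2) hlt count

-- ===== VERDICT (by name: the statement is the Claim_ definition above) =====
theorem neg_number_spec : Claim_equal_neg_number := by
  intro n count _
  unfold Spec_neg_number neg_number neg_number_alt
  by_cases h : n.natAbs = 0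
  · simp [h, negLoop]
  · rw [negLoop_true]
    simp only [rstrip0, binDigits_reverse, List.count_reverse]
    simp [h]
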